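-- pv_equiv track=rewrite | github.com/ylsdamxssjxxdd/wunder | mcp_server/tools/personnel/db.py | _strip_sql_comments
-- ===== SOURCE A (Python) =====
-- def _strip_sql_comments(sql: str) -> str:
--     text = sql.lstrip()
--     while True:
--         if text.startswith("--"):
--             newline_idx = text.find("\n")
--             text = "" if newline_idx == -1 else text[newline_idx + 1 :].lstrip()
--             continue
--         if text.startswith("/*"):
--             end_idx = text.find("*/")
--             text = "" if end_idx == -1 else text[end_idx + 2 :].lstrip()
--             continue
--         return text
-- ===== SOURCE B (Python) =====
-- def _strip_sql_comments(sql: str) -> str: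
--     n = len(sql)
--     i = 0
--     while True:
--         while i < n and sql[i].isspace():
--             i += 1
--         if sql.startswith("--", i):
--             j = sql.find("\n", i)
--             if j == -1:
--                 return ""
--             i = j + 1
--         elif sql.startswith("/*", i):
--             j = sql.find("*/", i)
--             if j == -1:
--                 return ""
--             i = j + 2
--         else:
--             return sql[i:]
-- ===== Notes on version B (the rewrite author's own statement) =====
-- stated objective: alternative
-- what changed: Replaced A's loop that repeatedly re-slices the string and lstrips the remainder with a single index cursor over the unchanged string: whitespace is skipped by advancing the cursor, comments by find(sub, i) from the cursor, and one final slice produces the result (no intermediate string copies).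
import Mathlib
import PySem

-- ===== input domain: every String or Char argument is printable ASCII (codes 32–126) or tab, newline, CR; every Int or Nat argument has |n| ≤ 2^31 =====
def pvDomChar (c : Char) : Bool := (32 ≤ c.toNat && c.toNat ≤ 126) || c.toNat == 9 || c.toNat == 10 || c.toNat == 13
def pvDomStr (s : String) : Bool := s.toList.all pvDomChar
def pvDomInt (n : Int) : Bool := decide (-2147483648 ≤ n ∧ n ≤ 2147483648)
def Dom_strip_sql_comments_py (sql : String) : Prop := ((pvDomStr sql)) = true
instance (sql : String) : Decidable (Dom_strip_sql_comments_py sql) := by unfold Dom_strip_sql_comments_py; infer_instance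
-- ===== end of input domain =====

-- B replaces A's repeated slice-and-lstrip loop by a single index cursor over the
-- unchanged string (no intermediate copies; one final slice) — alternative decomposition.

-- ===== PORT A =====
-- A's while-loop: text is re-sliced and lstripped each round; recursion on the text,
-- whose length strictly decreases in each comment-stripping round.
def stripAGo (t : List Char) : List Char :=
  if h1 : PySem.Chars.startswith t ['-', '-'] = true then
    -- newline_idx = text.find("\n"); text = "" if -1 else text[newline_idx+1:].lstrip()
    if h2 : PySem.Chars.find t ['\n'] = -1 then []
    else stripAGo (PySem.Chars.lstrip (List.drop ((PySem.Chars.find t ['\n']).toNat + 1) t))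
  else if h3 : PySem.Chars.startswith t ['/', '*'] = true then
    -- end_idx = text.find("*/"); text = "" if -1 else text[end_idx+2:].lstrip()
    if h4 : PySem.Chars.find t ['*', '/'] = -1 then []
    else stripAGo (PySem.Chars.lstrip (List.drop ((PySem.Chars.find t ['*', '/']).toNat + 2) t))
  else t
termination_by t.length
decreasing_by
  · have ht : t ≠ [] := by
      intro h; subst h; simp [PySem.Chars.startswith] at h1
    have h5 := List.length_dropWhile_le (p := PySem.Chars.isspace)
        (l := List.drop ((PySem.Chars.find t ['\n']).toNat + 1) t)
    simp only [PySem.Chars.lstrip]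
    rw [List.length_drop] at h5
    have hlen : 0 < t.length := List.length_pos_iff.mpr ht
    omega
  · have ht : t ≠ [] := by
      intro h; subst h; simp [PySem.Chars.startswith] at h3
    have h5 := List.length_dropWhile_le (p := PySem.Chars.isspace)
        (l := List.drop ((PySem.Chars.find t ['*', '/']).toNat + 2) t)
    simp only [PySem.Chars.lstrip]
    rw [List.length_drop] at h5
    have hlen : 0 < t.length := List.length_pos_iff.mpr ht
    omega

def strip_sql_comments_py (sql : String) : String :=
  String.ofList (stripAGo (PySem.Chars.lstrip sql.toList))

-- ===== PORT B =====
-- Source B's inner loop 'while i < n and sql[i].isspace(): i += 1'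
def skipWs (cs : List Char) (i : Nat) : Nat :=
  if h : i < cs.length then
    if PySem.Chars.isspace cs[i] = true then skipWs cs (i + 1) else i
  else i
termination_by cs.length - i

-- i ≤ skipWs cs i (needed for stripBGo's termination; cited in its decreasing_by)
theorem skipWs_ge (cs : List Char) (i : Nat) : i ≤ skipWs cs i := by
  rw [skipWs]
  split_ifs with h1 h2
  · have := skipWs_ge cs (i + 1); omega
  · omega
  · omega
termination_by cs.length - i

-- Source B's outer 'while True' loop; i is the cursor into the unchanged string.
-- sql.startswith(p, i) is ported as startswith on the suffix (exact for 0 ≤ i);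
-- sql.find(sub, i) is PySem.Chars.findFrom.
def stripBGo (cs : List Char) (i : Nat) : List Char :=
  if h1 : PySem.Chars.startswith (List.drop (skipWs cs i) cs) ['-', '-'] = true then
    if h2 : PySem.Chars.findFrom cs ['\n'] ((skipWs cs i : Nat) : Int) = -1 then []
    else stripBGo cs ((PySem.Chars.findFrom cs ['\n'] ((skipWs cs i : Nat) : Int)).toNat + 1)
  else if h3 : PySem.Chars.startswith (List.drop (skipWs cs i) cs) ['/', '*'] = true then
    if h4 : PySem.Chars.findFrom cs ['*', '/'] ((skipWs cs i : Nat) : Int) = -1 then []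
    else stripBGo cs ((PySem.Chars.findFrom cs ['*', '/'] ((skipWs cs i : Nat) : Int)).toNat + 2)
  else List.drop (skipWs cs i) cs
termination_by cs.length - i
decreasing_by
  · have hge := skipWs_ge cs i
    have hlt : skipWs cs i < cs.length := by
      have hp := (PySem.Chars.startswith_iff _ _).mp h1
      have := hp.length_le
      rw [List.length_drop] at this
      simp at this
      omega
    have hspec := PySem.Chars.findFrom_natCast_spec cs ['\n'] (skipWs cs i) (by omega) h2
    have := hspec.1
    omega
  · have hge := skipWs_ge cs i
    have hlt : skipWs cs i < cs.length := by
      have hp := (PySem.Chars.startswith_iff _ _).mp h3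
      have := hp.length_le
      rw [List.length_drop] at this
      simp at this
      omega
    have hspec := PySem.Chars.findFrom_natCast_spec cs ['*', '/'] (skipWs cs i) (by omega) h4
    have := hspec.1
    omega

def strip_sql_comments_py_alt (sql : String) : String :=
  String.ofList (stripBGo sql.toList 0)

-- ===== PRECONDITION & SPEC =====
def Spec_strip_sql_comments_py (sql : String) (out : String) : Prop := out = strip_sql_comments_py_alt sql
instance (sql : String) (out : String) : Decidable (Spec_strip_sql_comments_py sql out) := by unfold Spec_strip_sql_comments_py; infer_instance

-- ===== CLAIM (what is proved, stated in full; the proofs are below) =====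
def Claim_equal_strip_sql_comments_py : Prop := ∀ (sql : String), Dom_strip_sql_comments_py sql → Spec_strip_sql_comments_py sql (strip_sql_comments_py sql)

-- ===== LEMMAS AND PROOFS =====

theorem skipWs_le (cs : List Char) (i : Nat) (h : i ≤ cs.length) : skipWs cs i ≤ cs.length := by
  rw [skipWs]
  split_ifs with h1 h2
  · exact skipWs_le cs (i + 1) (by omega)
  · omega
  · omega
termination_by cs.length - i

theorem skipWs_drop (cs : List Char) (i : Nat) :
    List.drop (skipWs cs i) cs = List.dropWhile PySem.Chars.isspace (List.drop i cs) := by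
  rw [skipWs]
  split_ifs with h1 h2
  · rw [skipWs_drop cs (i + 1), List.drop_eq_getElem_cons h1,
      List.dropWhile_cons_of_pos h2]
  · rw [List.drop_eq_getElem_cons h1, List.dropWhile_cons_of_neg (by simp [h2])]
  · rw [List.drop_eq_nil_of_le (le_of_not_gt h1)]
    simp
termination_by cs.length - i

theorem main_eq (cs : List Char) (i : Nat) (hi : i ≤ cs.length) :
    stripBGo cs i = stripAGo (PySem.Chars.lstrip (List.drop i cs)) := by
  have hge := skipWs_ge cs i
  have hle := skipWs_le cs i hi
  have ht : PySem.Chars.lstrip (List.drop i cs) = List.drop (skipWs cs i) cs := by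
    show List.dropWhile PySem.Chars.isspace (List.drop i cs) = _
    exact (skipWs_drop cs i).symm
  rw [ht]
  rw [stripBGo, stripAGo]
  by_cases hA : PySem.Chars.startswith (List.drop (skipWs cs i) cs) ['-', '-'] = true
  · rw [dif_pos hA, dif_pos hA]
    have hfc := PySem.Chars.findFrom_natCast cs ['\n'] (skipWs cs i) hle
    by_cases hf : PySem.Chars.find (List.drop (skipWs cs i) cs) ['\n'] = -1
    · rw [dif_pos hf, dif_pos (by rw [hfc, if_pos hf])]
    · have h0 : 0 ≤ PySem.Chars.find (List.drop (skipWs cs i) cs) ['\n'] := by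
        have := PySem.Chars.neg_one_le_find (List.drop (skipWs cs i) cs) ['\n']
        omega
      have hval : PySem.Chars.findFrom cs ['\n'] ((skipWs cs i : Nat) : Int)
          = (skipWs cs i : Int) + PySem.Chars.find (List.drop (skipWs cs i) cs) ['\n'] := by
        rw [hfc, if_neg hf]
      have hocc := (PySem.Chars.find_spec h0).1
      have hocclen := hocc.length_le
      rw [List.length_drop, List.length_drop] at hocclen
      simp only [List.length_cons, List.length_nil] at hocclen
      rw [dif_neg hf, dif_neg (by rw [hval]; omega)]
      have hidx : (PySem.Chars.findFrom cs ['\n'] ((skipWs cs i : Nat) : Int)).toNat + 1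
          = skipWs cs i + ((PySem.Chars.find (List.drop (skipWs cs i) cs) ['\n']).toNat + 1) := by
        rw [hval]; omega
      rw [hidx, main_eq cs _ (by omega), ← List.drop_drop]
  · rw [dif_neg hA, dif_neg hA]
    by_cases hB : PySem.Chars.startswith (List.drop (skipWs cs i) cs) ['/', '*'] = true
    · rw [dif_pos hB, dif_pos hB]
      have hfc := PySem.Chars.findFrom_natCast cs ['*', '/'] (skipWs cs i) hle
      by_cases hf : PySem.Chars.find (List.drop (skipWs cs i) cs) ['*', '/'] = -1
      · rw [dif_pos hf, dif_pos (by rw [hfc, if_pos hf])]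
      · have h0 : 0 ≤ PySem.Chars.find (List.drop (skipWs cs i) cs) ['*', '/'] := by
          have := PySem.Chars.neg_one_le_find (List.drop (skipWs cs i) cs) ['*', '/']
          omega
        have hval : PySem.Chars.findFrom cs ['*', '/'] ((skipWs cs i : Nat) : Int)
            = (skipWs cs i : Int) + PySem.Chars.find (List.drop (skipWs cs i) cs) ['*', '/'] := by
          rw [hfc, if_neg hf]
        have hocc := (PySem.Chars.find_spec h0).1
        have hocclen := hocc.length_le
        rw [List.length_drop, List.length_drop] at hocclen
        simp only [List.length_cons, List.length_nil] at hocclen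
        rw [dif_neg hf, dif_neg (by rw [hval]; omega)]
        have hidx : (PySem.Chars.findFrom cs ['*', '/'] ((skipWs cs i : Nat) : Int)).toNat + 2
            = skipWs cs i + ((PySem.Chars.find (List.drop (skipWs cs i) cs) ['*', '/']).toNat + 2) := by
          rw [hval]; omega
        rw [hidx, main_eq cs _ (by omega), ← List.drop_drop]
    · rw [dif_neg hB, dif_neg hB]
termination_by cs.length - i
decreasing_by
  · have hlt : skipWs cs i < cs.length := by
      have hp := (PySem.Chars.startswith_iff _ _).mp hA
      have := hp.length_le
      rw [List.length_drop] at this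
      simp at this
      omega
    omega
  · have hlt : skipWs cs i < cs.length := by
      have hp := (PySem.Chars.startswith_iff _ _).mp hB
      have := hp.length_le
      rw [List.length_drop] at this
      simp at this
      omega
    omega

-- ===== VERDICT (by name: the statement is the Claim_ definition above) =====
theorem strip_sql_comments_py_spec : Claim_equal_strip_sql_comments_py := by
  intro sql _
  unfold Spec_strip_sql_comments_py strip_sql_comments_py strip_sql_comments_py_alt
  rw [main_eq sql.toList 0 (by omega)]
  simp
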